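-- pv_equiv track=rewrite | github.com/natemalek/molen-pater-nathan-rma-thesis-coreference-with-singletons | exp-genres.py | sublist_ignore_case
-- ===== SOURCE A (Python) =====
-- def sublist_ignore_case(needle, haystack):
--     needle_lower = [item.lower() for item in needle]
--     haystack_lower = [item.lower() for item in haystack]
--     for i in range(len(haystack)-len(needle)+1):
--         if haystack_lower[i] == needle_lower[0]:
--             # don't iterate from 1 because an empty list will be judged as False
--             match = all(haystack_lower[i+j] == needle_lower[j]
--                         for j in range(len(needle_lower)))
--             if match:
--                 return True
--     return False
-- ===== SOURCE B (Python) =====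
-- def sublist_ignore_case(needle, haystack):
--     n = [s.lower() for s in needle]
--     h = [s.lower() for s in haystack]
--     while len(n) <= len(h):
--         if h[:len(n)] == n:
--             return True
--         h = h[1:]
--     return False
-- ===== Notes on version B (the rewrite author's own statement) =====
-- stated objective: simpler
-- what changed: Replaces the index-arithmetic scan with its first-element pre-check and inner generator by a plain shrink-the-haystack loop comparing a prefix slice at each step.
-- crash fix: On an empty needle A raises IndexError (it indexes needle_lower[0], or haystack_lower[0] on an empty haystack); B returns True, the conventional answer for an empty sublist. — e.g. on sublist_ignore_case([], ["x"]): A raises IndexError, B returns true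
import Mathlib
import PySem

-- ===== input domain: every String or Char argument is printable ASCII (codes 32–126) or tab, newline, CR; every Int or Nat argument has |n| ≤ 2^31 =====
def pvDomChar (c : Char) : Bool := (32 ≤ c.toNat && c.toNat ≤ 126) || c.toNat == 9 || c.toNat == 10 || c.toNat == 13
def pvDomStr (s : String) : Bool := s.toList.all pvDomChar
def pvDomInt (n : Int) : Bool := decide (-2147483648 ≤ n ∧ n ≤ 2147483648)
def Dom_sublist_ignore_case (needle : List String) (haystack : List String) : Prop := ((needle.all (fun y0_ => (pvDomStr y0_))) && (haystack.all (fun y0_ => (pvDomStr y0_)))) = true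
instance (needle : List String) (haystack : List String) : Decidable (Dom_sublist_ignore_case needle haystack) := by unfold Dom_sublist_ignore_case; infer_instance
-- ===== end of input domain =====

-- B replaces A's index-arithmetic scan by a shrink-the-haystack prefix-comparison loop; return-value equivalence only.

-- ===== PORT A =====
-- inner generator: all(haystack_lower[i+j] == needle_lower[j] for j in range(len(needle_lower)))
def pvAMatch (nl hl : List String) (i : Int) : Bool :=
  (PySem.List.pyRange 0 (nl.length : Int) 1).all
    (fun j => PySem.List.pyGet? hl (i + j) == PySem.List.pyGet? nl j)

-- the 'for i in range(...)' loop with its early return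
def pvALoop (nl hl : List String) : List Int → Bool
  | [] => false
  | i :: rest =>
      if PySem.List.pyGet? hl i == PySem.List.pyGet? nl 0 then
        if pvAMatch nl hl i then true else pvALoop nl hl rest
      else pvALoop nl hl rest

def sublist_ignore_case (needle : List String) (haystack : List String) : Bool :=
  let nl := needle.map PySem.Str.lower
  let hl := haystack.map PySem.Str.lower
  pvALoop nl hl (PySem.List.pyRange 0 ((haystack.length : Int) - (needle.length : Int) + 1) 1)

-- ===== PORT B =====
-- while len(n) <= len(h): if h[:len(n)] == n: return True; h = h[1:]
def pvBLoop (nl : List String) : List String → Bool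
  | [] => if nl.length ≤ 0 then (if List.isPrefixOf nl [] then true else false) else false
  | a :: t =>
      if nl.length ≤ t.length + 1 then
        if List.isPrefixOf nl (a :: t) then true else pvBLoop nl t
      else false

def sublist_ignore_case_alt (needle : List String) (haystack : List String) : Bool :=
  pvBLoop (needle.map PySem.Str.lower) (haystack.map PySem.Str.lower)

-- ===== PRECONDITION & SPEC =====
-- A indexes needle_lower[0] (or haystack_lower[0] when the haystack is empty), so it raises IndexError on an empty needle.
def Pre_sublist_ignore_case (needle : List String) (haystack : List String) : Prop := needle ≠ []
instance (needle : List String) (haystack : List String) : Decidable (Pre_sublist_ignore_case needle haystack) := by unfold Pre_sublist_ignore_case; infer_instance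
def pvWitness_sublist_ignore_case : List String × List String := (["Ab"], ["x", "aB", "y"])

-- On an empty needle A raises IndexError; B returns true, the conventional answer for an empty sublist.
def Raises_sublist_ignore_case (needle : List String) (haystack : List String) : Prop := needle = []
instance (needle : List String) (haystack : List String) : Decidable (Raises_sublist_ignore_case needle haystack) := by unfold Raises_sublist_ignore_case; infer_instance
def pvRaiseWitness_sublist_ignore_case : List String × List String := ([], ["x"])
def pvRaiseWitnessOut_sublist_ignore_case : Bool := true

def Spec_sublist_ignore_case (needle : List String) (haystack : List String) (out : Bool) : Prop := out = sublist_ignore_case_alt needle haystack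
instance (needle : List String) (haystack : List String) (out : Bool) : Decidable (Spec_sublist_ignore_case needle haystack out) := by unfold Spec_sublist_ignore_case; infer_instance

-- ===== CLAIM (what is proved, stated in full; the proofs are below) =====
def Claim_equal_sublist_ignore_case : Prop := ∀ (needle : List String) (haystack : List String), Dom_sublist_ignore_case needle haystack → Pre_sublist_ignore_case needle haystack → Spec_sublist_ignore_case needle haystack (sublist_ignore_case needle haystack)
def Claim_raises_sublist_ignore_case : Prop := (∀ (needle : List String) (haystack : List String), Dom_sublist_ignore_case needle haystack → Raises_sublist_ignore_case needle haystack → ¬ Pre_sublist_ignore_case needle haystack) ∧ (Dom_sublist_ignore_case (pvRaiseWitness_sublist_ignore_case.1) (pvRaiseWitness_sublist_ignore_case.2) ∧ Raises_sublist_ignore_case (pvRaiseWitness_sublist_ignore_case.1) (pvRaiseWitness_sublist_ignore_case.2) ∧ sublist_ignore_case_alt (pvRaiseWitness_sublist_ignore_case.1) (pvRaiseWitness_sublist_ignore_case.2) = pvRaiseWitnessOut_sublist_ignore_case)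

-- ===== LEMMAS AND PROOFS =====

-- B's loop returns true exactly when the (lowered) needle is a contiguous sublist.
theorem pvB_iff (nl : List String) : ∀ hl, pvBLoop nl hl = true ↔ nl <:+: hl
  | [] => by
    cases nl with
    | nil => simp [pvBLoop]
    | cons x xs => simp [pvBLoop, List.infix_nil]
  | a :: t => by
    rw [List.infix_cons_iff, ← pvB_iff nl t]
    simp only [pvBLoop]
    split_ifs with h1 h2
    · simp [List.isPrefixOf_iff_prefix.mp h2]
    · constructor
      · exact Or.inr
      · rintro (hp | hb)
        · exact absurd (List.isPrefixOf_iff_prefix.mpr hp) (by simp [h2])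
        · exact hb
    · constructor
      · intro h; cases h
      · rintro (hp | hb)
        · have := hp.length_le; simp at this h1; omega
        · have hle := ((pvB_iff nl t).mp hb).length_le
          simp at h1; omega

-- A's loop returns true exactly when some index in the list passes both checks.
theorem pvALoop_iff (nl hl : List String) : ∀ idxs, pvALoop nl hl idxs = true ↔
    ∃ i ∈ idxs, (PySem.List.pyGet? hl i == PySem.List.pyGet? nl 0) = true ∧ pvAMatch nl hl i = true
  | [] => by simp [pvALoop]
  | i :: rest => by
    simp only [pvALoop]
    split_ifs with h1 h2
    · exact iff_of_true rfl ⟨i, List.mem_cons_self, h1, h2⟩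
    · rw [pvALoop_iff nl hl rest]
      constructor
      · rintro ⟨j, hj, hc⟩; exact ⟨j, List.mem_cons_of_mem _ hj, hc⟩
      · rintro ⟨j, hj, hc1, hc2⟩
        rcases List.mem_cons.mp hj with rfl | hj
        · exact absurd hc2 h2
        · exact ⟨j, hj, hc1, hc2⟩
    · rw [pvALoop_iff nl hl rest]
      constructor
      · rintro ⟨j, hj, hc⟩; exact ⟨j, List.mem_cons_of_mem _ hj, hc⟩
      · rintro ⟨j, hj, hc1, hc2⟩
        rcases List.mem_cons.mp hj with rfl | hj
        · exact absurd hc1 h1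
        · exact ⟨j, hj, hc1, hc2⟩

-- prefix-of-drop characterised elementwise
theorem pvPrefixDrop (nl hl : List String) (K : Nat) (hle : K + nl.length ≤ hl.length) :
    nl <+: hl.drop K ↔ ∀ j, j < nl.length → nl[j]? = hl[K + j]? := by
  constructor
  · intro hp j hj
    have h1 := hp.getElem (i := j) hj
    rw [List.getElem_drop] at h1
    rw [List.getElem?_eq_getElem hj, List.getElem?_eq_getElem (by omega)]
    exact congrArg some h1
  · intro h
    rw [List.prefix_iff_eq_take]
    apply List.ext_getElem
    · simp; omega
    · intro j hj1 hj2
      have hj : j < nl.length := hj1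
      have := h j hj
      rw [List.getElem?_eq_getElem hj, List.getElem?_eq_getElem (by omega)] at this
      simpa [List.getElem_take, List.getElem_drop] using this

-- the inner generator is a prefix test at position i
theorem pvAMatch_iff (nl hl : List String) (i : Int) (h0 : 0 ≤ i)
    (hle : i.toNat + nl.length ≤ hl.length) :
    pvAMatch nl hl i = true ↔ nl <+: hl.drop i.toNat := by
  rw [pvPrefixDrop nl hl i.toNat hle]
  unfold pvAMatch
  rw [List.all_eq_true]
  constructor
  · intro h j hj
    have hmem : (j : Int) ∈ PySem.List.pyRange 0 (nl.length : Int) 1 := by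
      rw [PySem.List.mem_pyRange_one]; omega
    have this1 := h _ hmem
    have e1 := PySem.List.pyGet?_of_nonneg (xs := hl) (i := i + (j : Int)) (by omega)
    have e2 := PySem.List.pyGet?_of_nonneg (xs := nl) (i := (j : Int)) (by omega)
    rw [e1, e2] at this1
    have hc1 : (i + (j : Int)).toNat = i.toNat + j := by omega
    have hc2 : ((j : Int)).toNat = j := by omega
    rw [hc1, hc2] at this1
    simp only [beq_iff_eq] at this1
    exact this1.symm
  · intro h j hmem
    rw [PySem.List.mem_pyRange_one] at hmem
    obtain ⟨hj0, hjlt⟩ := hmem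
    have e1 := PySem.List.pyGet?_of_nonneg (xs := hl) (i := i + j) (by omega)
    have e2 := PySem.List.pyGet?_of_nonneg (xs := nl) (i := j) (by omega)
    rw [e1, e2]
    have hc1 : (i + j).toNat = i.toNat + j.toNat := by omega
    rw [hc1]
    simp only [beq_iff_eq]
    exact (h j.toNat (by omega)).symm

-- A's loop over the full index range decides the contiguous-sublist property (nonempty needle)
theorem pvA_iff (nl hl : List String) (hnl : nl ≠ []) :
    pvALoop nl hl (PySem.List.pyRange 0 ((hl.length : Int) - (nl.length : Int) + 1) 1) = true ↔
      nl <:+: hl := by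
  have hnlpos : 0 < nl.length := List.length_pos_iff.mpr hnl
  rw [pvALoop_iff]
  constructor
  · rintro ⟨i, hmem, _, hm⟩
    rw [PySem.List.mem_pyRange_one] at hmem
    obtain ⟨h0, hlt⟩ := hmem
    have hle : i.toNat + nl.length ≤ hl.length := by omega
    have hp := (pvAMatch_iff nl hl i h0 hle).mp hm
    exact hp.isInfix.trans (List.drop_suffix i.toNat hl).isInfix
  · rintro ⟨s, t, rfl⟩
    have hlen : (s ++ nl ++ t).length = s.length + nl.length + t.length := by
      simp only [List.length_append]
    have hle : (s.length : Int).toNat + nl.length ≤ (s ++ nl ++ t).length := by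
      rw [Int.toNat_natCast]; omega
    have hp : nl <+: (s ++ nl ++ t).drop (s.length : Int).toNat := by
      rw [Int.toNat_natCast, List.append_assoc, List.drop_left]
      exact List.prefix_append nl t
    refine ⟨(s.length : Int), ?_, ?_, ?_⟩
    · rw [PySem.List.mem_pyRange_one]
      constructor
      · omega
      · push_cast [hlen]; omega
    · -- first-element check follows from the j = 0 instance of the prefix
      have h00 := (pvPrefixDrop nl (s ++ nl ++ t) (s.length : Int).toNat hle |>.mp hp) 0 hnlpos
      have e1 := PySem.List.pyGet?_of_nonneg (xs := s ++ nl ++ t) (i := (s.length : Int)) (by omega)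
      have e2 := PySem.List.pyGet?_of_nonneg (xs := nl) (i := (0 : Int)) (by omega)
      rw [e1, e2]
      simp only [beq_iff_eq, Int.toNat_natCast, Int.toNat_zero]
      rw [Int.toNat_natCast] at h00
      simpa using h00.symm
    · exact (pvAMatch_iff nl (s ++ nl ++ t) (s.length : Int) (by omega) hle).mpr hp

-- ===== VERDICT (by name: the statement is the Claim_ definition above) =====
theorem sublist_ignore_case_spec : Claim_equal_sublist_ignore_case := by
  intro needle haystack _ hpre
  unfold Spec_sublist_ignore_case sublist_ignore_case sublist_ignore_case_alt
  have hnl : needle.map PySem.Str.lower ≠ [] := by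
    simpa using hpre
  have hlen1 : ((needle.map PySem.Str.lower).length : Int) = (needle.length : Int) := by simp
  have hlen2 : ((haystack.map PySem.Str.lower).length : Int) = (haystack.length : Int) := by simp
  rw [Bool.eq_iff_iff]
  rw [pvB_iff, ← hlen1, ← hlen2]
  exact pvA_iff _ _ hnl

theorem sublist_ignore_case_raises : Claim_raises_sublist_ignore_case := by
  unfold Claim_raises_sublist_ignore_case
  exact ⟨fun n h _ hr hp => hp hr, by decide⟩

-- witness self-check: the raise witness really lies in the stated raise region
theorem pvRaisesWitness_ok :
    Raises_sublist_ignore_case pvRaiseWitness_sublist_ignore_case.1 pvRaiseWitness_sublist_ignore_case.2 :=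
  sublist_ignore_case_raises.2.2.1
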